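-- pv_equiv track=rewrite | github.com/mink365/RacingEngine | build/tools/makefile_generator.py | excludePath
-- ===== SOURCE A (Python) =====
-- def excludePath(file_list, exclude):
--     path_list = []
--
--     for path in file_list:
--         exc = False
--
--         for ex in exclude:
--             if path.startswith(ex):
--                 exc = True
--                 break
--
--         if not exc:
--             path_list.append(path)
--
--     return path_list
-- ===== SOURCE B (Python) =====
-- def excludePath(file_list, exclude):
--     # Build a prefix trie of the exclude strings (terminal marker: key None),
--     # then test each path with a single walk down the trie.
--     root = {}
--     for ex in exclude:
--         node = root
--         for c in ex:
--             node = node.setdefault(c, {})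
--         node[None] = True
--
--     def matches(path):
--         node = root
--         if None in node:
--             return True
--         for c in path:
--             if c not in node:
--                 return False
--             node = node[c]
--             if None in node:
--                 return True
--         return False
--
--     return [p for p in file_list if not matches(p)]
-- ===== Notes on version B (the rewrite author's own statement) =====
-- stated objective: faster
-- what changed: B builds a prefix trie from the exclude strings once and tests each path by a single walk down the trie, replacing A's per-path linear scan over all exclude prefixes with startswith.
import Mathlib
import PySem

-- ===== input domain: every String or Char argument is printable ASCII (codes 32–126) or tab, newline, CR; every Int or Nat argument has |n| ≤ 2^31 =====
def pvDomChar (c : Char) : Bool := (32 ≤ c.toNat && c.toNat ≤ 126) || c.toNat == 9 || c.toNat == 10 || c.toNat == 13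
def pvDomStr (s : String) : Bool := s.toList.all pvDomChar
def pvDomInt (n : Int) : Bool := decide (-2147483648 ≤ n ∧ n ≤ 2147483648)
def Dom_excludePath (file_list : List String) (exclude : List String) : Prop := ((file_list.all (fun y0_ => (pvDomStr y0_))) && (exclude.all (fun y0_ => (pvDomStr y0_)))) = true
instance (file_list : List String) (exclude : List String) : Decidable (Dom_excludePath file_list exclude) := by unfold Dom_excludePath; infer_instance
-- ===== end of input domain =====

-- B replaces A's per-path scan over all exclude prefixes by one prefix trie built
-- once from the excludes and a single trie walk per path (objective: faster).

-- ===== PORT A =====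
-- inner 'for ex in exclude: if path.startswith(ex): exc = True; break'
def pvAnyStarts (path : String) : List String → Bool
  | [] => false
  | ex :: rest => if PySem.Str.startswith path ex then true else pvAnyStarts path rest

def excludePath (file_list : List String) (exclude : List String) : List String :=
  file_list.foldl (fun path_list path =>
    if pvAnyStarts path exclude then path_list else path_list ++ [path]) []

-- ===== PORT B =====
-- trie node: terminal flag + children association list (dict-of-dicts in Source B)
mutual
inductive PvTrie where
  | node : Bool → PvKids → PvTrie
inductive PvKids where
  | nil : PvKids
  | cons : Char → PvTrie → PvKids → PvKids
end

def pvFindKid : PvKids → Char → Option PvTrie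
  | .nil, _ => none
  | .cons d t r, c => if c = d then some t else pvFindKid r c

def pvSetKid : PvKids → Char → PvTrie → PvKids
  | .nil, c, t => .cons c t .nil
  | .cons d t0 r, c, t => if c = d then .cons d t r else .cons d t0 (pvSetKid r c t)

-- 'node = node.setdefault(c, {})' walk + final 'node[None] = True'
def pvTrieIns : PvTrie → List Char → PvTrie
  | .node _ ch, [] => .node true ch
  | .node b ch, c :: cs =>
    .node b (pvSetKid ch c (pvTrieIns ((pvFindKid ch c).getD (.node false .nil)) cs))

-- 'matches(path)': walk the trie, succeeding as soon as a terminal node is hit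
def pvTrieMatch : PvTrie → List Char → Bool
  | .node b _, [] => b
  | .node b ch, c :: cs =>
    b || (match pvFindKid ch c with
          | none => false
          | some t => pvTrieMatch t cs)

def excludePath_alt (file_list : List String) (exclude : List String) : List String :=
  let root := exclude.foldl (fun t ex => pvTrieIns t ex.toList) (.node false .nil)
  file_list.filter (fun p => !pvTrieMatch root p.toList)

-- ===== PRECONDITION & SPEC =====
def Spec_excludePath (file_list : List String) (exclude : List String) (out : List String) : Prop := out = excludePath_alt file_list exclude
instance (file_list : List String) (exclude : List String) (out : List String) : Decidable (Spec_excludePath file_list exclude out) := by unfold Spec_excludePath; infer_instance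

-- ===== CLAIM (what is proved, stated in full; the proofs are below) =====
def Claim_equal_excludePath : Prop := ∀ (file_list : List String) (exclude : List String), Dom_excludePath file_list exclude → Spec_excludePath file_list exclude (excludePath file_list exclude)

-- ===== LEMMAS AND PROOFS =====

theorem pvTrieMatch_empty (cs : List Char) : pvTrieMatch (.node false .nil) cs = false := by
  cases cs <;> simp [pvTrieMatch, pvFindKid]

theorem pvFindKid_setKid : ∀ (ch : PvKids) (a : Char) (t : PvTrie) (c : Char),
    pvFindKid (pvSetKid ch a t) c = if c = a then some t else pvFindKid ch c
  | .nil, a, t, c => by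
    by_cases h : c = a <;> simp [pvSetKid, pvFindKid, h]
  | .cons d t0 r, a, t, c => by
    by_cases had : a = d
    · subst had
      by_cases h : c = a <;> simp [pvSetKid, pvFindKid, h]
    · by_cases h : c = d
      · subst h
        have hca : ¬ c = a := fun hh => had hh.symm
        simp [pvSetKid, pvFindKid, had, hca]
      · simp [pvSetKid, pvFindKid, had, h, pvFindKid_setKid r a t c]

theorem pvTrieMatch_ins (e : List Char) : ∀ (t : PvTrie) (p : List Char),
    pvTrieMatch (pvTrieIns t e) p = (pvTrieMatch t p || decide (e <+: p)) := by
  induction e with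
  | nil =>
    intro t p
    obtain ⟨b, ch⟩ := t
    cases p <;> simp [pvTrieIns, pvTrieMatch]
  | cons a as ih =>
    intro t p
    obtain ⟨b, ch⟩ := t
    cases p with
    | nil => simp [pvTrieIns, pvTrieMatch]
    | cons c cs =>
      simp only [pvTrieIns, pvTrieMatch, pvFindKid_setKid]
      by_cases h : c = a
      · subst h
        rw [if_pos rfl]
        cases hf : pvFindKid ch c with
        | none => simp [ih, pvTrieMatch_empty, List.cons_prefix_cons]
        | some t0 => simp [ih, List.cons_prefix_cons, Bool.or_assoc]
      · rw [if_neg h]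
        have : ¬ (a :: as <+: c :: cs) := by
          simp only [List.cons_prefix_cons]; rintro ⟨hac, -⟩; exact h hac.symm
        simp [this]

theorem pvTrieMatch_fold (exs : List String) : ∀ (t : PvTrie) (p : List Char),
    pvTrieMatch (exs.foldl (fun t ex => pvTrieIns t ex.toList) t) p =
      (pvTrieMatch t p || exs.any (fun e => decide (e.toList <+: p))) := by
  induction exs with
  | nil => intro t p; simp
  | cons e rest ih =>
    intro t p
    simp only [List.foldl_cons, List.any_cons, ih, pvTrieMatch_ins, Bool.or_assoc]

theorem pvAnyStarts_eq_any (path : String) (exs : List String) :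
    pvAnyStarts path exs = exs.any (fun e => decide (e.toList <+: path.toList)) := by
  induction exs with
  | nil => rfl
  | cons e rest ih =>
    have hs : PySem.Str.startswith path e = decide (e.toList <+: path.toList) := by
      by_cases hp : e.toList <+: path.toList
      · simpa [hp] using (PySem.Chars.startswith_iff path.toList e.toList).mpr hp
      · simp only [hp, decide_false]
        by_contra hb
        exact hp ((PySem.Chars.startswith_iff path.toList e.toList).mp
          (by simpa using Bool.of_not_eq_false hb))
    simp only [pvAnyStarts, List.any_cons, ← ih, hs]
    cases decide (e.toList <+: path.toList) <;> simp

theorem excludePath_foldl (exclude : List String) (fl : List String) :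
    ∀ (acc : List String),
    fl.foldl (fun path_list path =>
      if pvAnyStarts path exclude then path_list else path_list ++ [path]) acc =
      acc ++ fl.filter (fun p => !pvAnyStarts p exclude) := by
  induction fl with
  | nil => intro acc; simp
  | cons p rest ih =>
    intro acc
    by_cases h : pvAnyStarts p exclude = true <;>
      simp [List.foldl_cons, h, ih]

-- ===== VERDICT (by name: the statement is the Claim_ definition above) =====
theorem excludePath_spec : Claim_equal_excludePath := by
  intro file_list exclude _
  unfold Spec_excludePath excludePath excludePath_alt
  rw [excludePath_foldl]
  simp only [List.nil_append]
  apply List.filter_congr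
  intro p _
  rw [pvAnyStarts_eq_any, pvTrieMatch_fold, pvTrieMatch_empty, Bool.false_or]
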